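-- pv_equiv track=rewrite | github.com/gayecolakoglu/IE-from-LRDS-with-LLMs | modules/postprocessing.py | map_schema_keys
-- ===== SOURCE A (Python) =====
-- def map_schema_keys(reconciled_predictions: dict, defined_schema: dict, synonym_dict: dict = None) -> dict:
--     """
--     Map reconciled_predictions keys to defined schema using exact, partial, and synonym-based matching.
--
--     Args:
--     - reconciled_predictions (dict): Keys from the model output.
--     - defined_schema (dict): Defined schema with keys.
--     - synonym_dict (dict): Optional predefined dictionary of synonyms for schema keys.
--
--     Returns:
--     - dict: Mapping of output keys to schema keys.
--     """
--     synonym_dict = {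
--         "file_date": ["file date", "date", "record date", "filing date"],
--         "foreign_principle_name": ["foreign principle", "foreign principal name", "principal"],
--         "registrant_name": ["registrant", "registration name", "entity name"],
--         "registration_num": ["registration number", "reg number", "reg id"],
--         "signer_name": ["signer", "signatory", "authorized representative"],
--         "signer_title": ["title", "designation", "role", "position"],
--     }
--
--     synonym_dict_reverse = {}
--     for key, value in synonym_dict.items():
--         for item in value:
--             synonym_dict_reverse[item] = key
--
--     predicted_mapped = {}
--     for pred_key, pred_value in reconciled_predictions.items():
--         if pred_key in synonym_dict_reverse:
--             predicted_mapped[synonym_dict_reverse[pred_key]] = pred_value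
--         else:
--             predicted_mapped[pred_key] = pred_value
--
--     return predicted_mapped
-- ===== SOURCE B (Python) =====
-- def map_schema_keys(reconciled_predictions: dict, defined_schema: dict, synonym_dict: dict = None) -> dict:
--     synonym_dict = {
--         "file_date": ["file date", "date", "record date", "filing date"],
--         "foreign_principle_name": ["foreign principle", "foreign principal name", "principal"],
--         "registrant_name": ["registrant", "registration name", "entity name"],
--         "registration_num": ["registration number", "reg number", "reg id"],
--         "signer_name": ["signer", "signatory", "authorized representative"],
--         "signer_title": ["title", "designation", "role", "position"],
--     }
--
--     predicted_mapped = {}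
--     for pred_key, pred_value in reconciled_predictions.items():
--         mapped_key = pred_key
--         for schema_key, synonyms in synonym_dict.items():
--             if pred_key in synonyms:
--                 mapped_key = schema_key
--                 break
--         predicted_mapped[mapped_key] = pred_value
--
--     return predicted_mapped
-- ===== Notes on version B (the rewrite author's own statement) =====
-- stated objective: simpler
-- what changed: Drops the reverse-index dictionary build entirely: instead of inverting the synonym table into synonym_dict_reverse and doing a membership test plus lookup per key, B scans the synonym table directly for each prediction key (first schema key whose synonym list contains it, with break), keeping insertion order and overwrite semantics identical.
import Mathlib
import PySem

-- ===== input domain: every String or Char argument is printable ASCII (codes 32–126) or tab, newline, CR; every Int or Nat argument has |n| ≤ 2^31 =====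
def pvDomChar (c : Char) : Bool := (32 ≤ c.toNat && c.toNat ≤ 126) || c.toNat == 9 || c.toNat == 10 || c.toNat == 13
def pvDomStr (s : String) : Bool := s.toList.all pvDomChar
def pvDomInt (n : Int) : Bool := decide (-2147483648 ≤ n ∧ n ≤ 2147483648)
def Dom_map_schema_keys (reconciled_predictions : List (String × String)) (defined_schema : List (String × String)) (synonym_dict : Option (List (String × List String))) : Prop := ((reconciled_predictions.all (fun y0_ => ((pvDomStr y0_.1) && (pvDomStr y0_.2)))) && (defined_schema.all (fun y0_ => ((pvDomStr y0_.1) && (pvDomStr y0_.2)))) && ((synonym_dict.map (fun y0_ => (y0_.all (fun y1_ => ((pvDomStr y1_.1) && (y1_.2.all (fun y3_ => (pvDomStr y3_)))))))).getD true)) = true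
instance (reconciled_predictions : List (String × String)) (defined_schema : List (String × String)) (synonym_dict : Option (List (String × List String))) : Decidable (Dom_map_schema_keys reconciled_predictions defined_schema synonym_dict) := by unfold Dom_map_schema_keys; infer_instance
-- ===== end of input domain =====

-- B replaces A's reverse-index dictionary (build synonym→key map, then test+lookup per key) with a direct
-- scan of the synonym table per prediction key (first schema key whose list contains it, else keep the key);
-- objective: simpler. Neither program reads defined_schema or the synonym_dict parameter.

-- ===== PORT A =====
-- the hardcoded synonym table A (and B) assign over the parameter
def pvSynTable : List (String × List String) :=
  [("file_date", ["file date", "date", "record date", "filing date"]),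
   ("foreign_principle_name", ["foreign principle", "foreign principal name", "principal"]),
   ("registrant_name", ["registrant", "registration name", "entity name"]),
   ("registration_num", ["registration number", "reg number", "reg id"]),
   ("signer_name", ["signer", "signatory", "authorized representative"]),
   ("signer_title", ["title", "designation", "role", "position"])]

-- A's nested loop building synonym_dict_reverse
def pvRevFold (L : List (String × List String)) (d : PySem.Dict String String) : PySem.Dict String String :=
  L.foldl (fun d kv => kv.2.foldl (fun d item => d.insert item kv.1) d) d

def map_schema_keys (reconciled_predictions : List (String × String)) (defined_schema : List (String × String)) (synonym_dict : Option (List (String × List String))) : List (String × String) :=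
  let synonym_dict_reverse := pvRevFold pvSynTable PySem.Dict.empty
  let predicted_mapped :=
    reconciled_predictions.foldl (fun d pv =>
      match synonym_dict_reverse.get? pv.1 with   -- 'if pred_key in …' then '…[pred_key]'
      | some s => d.insert s pv.2
      | none => d.insert pv.1 pv.2) PySem.Dict.empty
  predicted_mapped.items

-- ===== PORT B =====
-- B's inner loop: first schema key whose synonym list contains k (break), else k itself
def pvScanSyn : List (String × List String) → String → String
  | [], k => k
  | (s, syns) :: rest, k => if syns.contains k then s else pvScanSyn rest k

def map_schema_keys_alt (reconciled_predictions : List (String × String)) (defined_schema : List (String × String)) (synonym_dict : Option (List (String × List String))) : List (String × String) :=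
  (reconciled_predictions.foldl
    (fun d pv => d.insert (pvScanSyn pvSynTable pv.1) pv.2) PySem.Dict.empty).items

-- ===== PRECONDITION & SPEC =====
def Spec_map_schema_keys (reconciled_predictions : List (String × String)) (defined_schema : List (String × String)) (synonym_dict : Option (List (String × List String))) (out : List (String × String)) : Prop := out = map_schema_keys_alt reconciled_predictions defined_schema synonym_dict
instance (reconciled_predictions : List (String × String)) (defined_schema : List (String × String)) (synonym_dict : Option (List (String × List String))) (out : List (String × String)) : Decidable (Spec_map_schema_keys reconciled_predictions defined_schema synonym_dict out) := by unfold Spec_map_schema_keys; infer_instance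

-- ===== CLAIM (what is proved, stated in full; the proofs are below) =====
def Claim_equal_map_schema_keys : Prop := ∀ (reconciled_predictions : List (String × String)) (defined_schema : List (String × String)) (synonym_dict : Option (List (String × List String))), Dom_map_schema_keys reconciled_predictions defined_schema synonym_dict → Spec_map_schema_keys reconciled_predictions defined_schema synonym_dict (map_schema_keys reconciled_predictions defined_schema synonym_dict)

-- ===== LEMMAS AND PROOFS =====

-- A's inner reverse-build loop over one synonym list, characterised by lookup
lemma get?_inner_fold (syns : List String) (s k : String) (d : PySem.Dict String String) :
    (syns.foldl (fun d item => d.insert item s) d).get? k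
      = if k ∈ syns then some s else d.get? k := by
  induction syns generalizing d with
  | nil => simp
  | cons a syns ih =>
    simp only [List.foldl_cons, ih, List.mem_cons]
    by_cases hk : k = a
    · subst hk
      by_cases hm : k ∈ syns <;> simp [hm, PySem.Dict.get?_insert_self]
    · by_cases hm : k ∈ syns <;> simp [hm, hk, PySem.Dict.get?_insert_of_ne _ _ hk]

-- groups whose synonym lists never mention k leave the lookup unchanged
lemma get?_revFold_not_mem (L : List (String × List String)) (k : String)
    (d : PySem.Dict String String) (h : k ∉ L.flatMap Prod.snd) :
    (pvRevFold L d).get? k = d.get? k := by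
  induction L generalizing d with
  | nil => rfl
  | cons p rest ih =>
    simp only [List.flatMap_cons, List.mem_append] at h
    push_neg at h
    simp only [pvRevFold, List.foldl_cons] at *
    rw [ih _ h.2, get?_inner_fold]
    simp [h.1]

-- the reverse-index lookup (default k) equals B's direct scan, whenever the synonym lists are disjoint
lemma get?_revFold_eq_scan (L : List (String × List String)) (k : String)
    (d : PySem.Dict String String) (hnd : (L.flatMap Prod.snd).Nodup)
    (hd : k ∉ L.flatMap Prod.snd → d.get? k = none) :
    ((pvRevFold L d).get? k).getD k = pvScanSyn L k := by
  induction L generalizing d with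
  | nil => simp [pvRevFold, pvScanSyn, hd (by simp)]
  | cons p rest ih =>
    obtain ⟨s, syns⟩ := p
    simp only [List.flatMap_cons, List.nodup_append] at hnd
    simp only [pvRevFold, List.foldl_cons, pvScanSyn]
    by_cases hm : k ∈ syns
    · have hrest : k ∉ rest.flatMap Prod.snd := fun hc => hnd.2.2 k hm k hc rfl
      rw [show (rest.foldl (fun d kv => kv.2.foldl (fun d item => d.insert item kv.1) d)
          (syns.foldl (fun d item => d.insert item s) d)) = pvRevFold rest
          (syns.foldl (fun d item => d.insert item s) d) from rfl,
        get?_revFold_not_mem _ _ _ hrest, get?_inner_fold]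
      simp [hm]
    · have := ih (syns.foldl (fun d item => d.insert item s) d) hnd.2.1
        (fun hr => by rw [get?_inner_fold]; simp [hm]; exact hd (by simp [List.flatMap_cons, hm, hr]))
      rw [show (rest.foldl (fun d kv => kv.2.foldl (fun d item => d.insert item kv.1) d)
          (syns.foldl (fun d item => d.insert item s) d)) = pvRevFold rest
          (syns.foldl (fun d item => d.insert item s) d) from rfl] at *
      rw [this]
      simp [hm]

-- the concrete table's synonym lists are pairwise disjoint
lemma pvSynTable_nodup : (pvSynTable.flatMap Prod.snd).Nodup := by decide

-- the two per-key mapping steps agree as functions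
lemma step_eq :
    (fun (d : PySem.Dict String String) (pv : String × String) =>
      match (pvRevFold pvSynTable PySem.Dict.empty).get? pv.1 with
      | some s => d.insert s pv.2
      | none => d.insert pv.1 pv.2)
    = (fun d pv => d.insert (pvScanSyn pvSynTable pv.1) pv.2) := by
  funext d pv
  have h := get?_revFold_eq_scan pvSynTable pv.1 PySem.Dict.empty
    pvSynTable_nodup (fun _ => rfl)
  cases hc : (pvRevFold pvSynTable PySem.Dict.empty).get? pv.1 <;>
    rw [hc] at h <;> simp at h <;> rw [← h]

-- ===== VERDICT (by name: the statement is the Claim_ definition above) =====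
theorem map_schema_keys_spec : Claim_equal_map_schema_keys := by
  intro rp ds sd _
  unfold Spec_map_schema_keys map_schema_keys map_schema_keys_alt
  show (List.foldl (fun (d : PySem.Dict String String) (pv : String × String) =>
      match (pvRevFold pvSynTable PySem.Dict.empty).get? pv.1 with
      | some s => d.insert s pv.2
      | none => d.insert pv.1 pv.2) PySem.Dict.empty rp).items
    = (List.foldl (fun d pv => d.insert (pvScanSyn pvSynTable pv.1) pv.2) PySem.Dict.empty rp).items
  rw [step_eq]
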